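-- pv_equiv track=rewrite | github.com/manumishra12/POD | All Question/vpropel_45.py | check
-- ===== SOURCE A (Python) =====
-- def check(l):
--     value=0
--     for i in range(len(l)):
--         digit = l.pop()
--         if digit == '1':
--         	value = value + pow(2, i)
--
--      #Checking for whether Decimal number is even or not
--     if (value%2==0):
--         return True
--     else:
--         return False
-- ===== SOURCE B (Python) =====
-- def check(l):
--     # Parity of the binary number depends only on its last bit: even iff last bit is not '1'.
--     # (Return-value equivalence only: A empties l via pop(); B leaves l untouched.)
--     return not (l and l[-1] == '1')
-- ===== Notes on version B (the rewrite author's own statement) =====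
-- stated objective: faster
-- what changed: B replaces the O(n) pop-and-accumulate conversion of the whole binary list with an O(1) look at the last element, since evenness depends only on the least-significant bit; B does not mutate l (A empties it).
import Mathlib
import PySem

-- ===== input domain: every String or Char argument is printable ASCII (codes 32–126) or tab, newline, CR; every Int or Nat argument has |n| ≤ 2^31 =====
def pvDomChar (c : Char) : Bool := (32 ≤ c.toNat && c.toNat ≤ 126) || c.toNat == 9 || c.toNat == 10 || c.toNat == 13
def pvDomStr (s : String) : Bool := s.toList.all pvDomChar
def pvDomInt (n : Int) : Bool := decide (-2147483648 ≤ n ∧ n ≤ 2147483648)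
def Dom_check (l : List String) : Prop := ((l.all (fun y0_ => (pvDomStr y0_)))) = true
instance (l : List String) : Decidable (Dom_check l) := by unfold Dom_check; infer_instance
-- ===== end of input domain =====

-- B replaces A's O(n) pop-and-accumulate binary-to-decimal loop with an O(1) look at the
-- last bit (evenness depends only on it); return-value equivalence only: A empties l via pop(), B does not mutate l.


-- ===== PORT A =====
-- one loop iteration: digit = l.pop(); if digit == '1': value += 2**i
def checkStep (st : List String × Int) (i : Nat) : List String × Int :=
  match PySem.List.pop? st.1 (-1) with
  | some (digit, rest) => (rest, if digit = "1" then st.2 + 2 ^ i else st.2)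
  | none => st

def check (l : List String) : Bool :=
  let st := (List.range l.length).foldl checkStep (l, 0)
  PySem.Int.mod st.2 2 == 0

-- ===== PORT B =====
def check_alt (l : List String) : Bool :=
  !(l.getLast? == some "1")

-- ===== PRECONDITION & SPEC =====
def Spec_check (l : List String) (out : Bool) : Prop := out = check_alt l
instance (l : List String) (out : Bool) : Decidable (Spec_check l out) := by unfold Spec_check; infer_instance

-- ===== CLAIM (what is proved, stated in full; the proofs are below) =====
def Claim_equal_check : Prop := ∀ (l : List String), Dom_check l → Spec_check l (check l)

-- ===== LEMMAS AND PROOFS =====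

-- iterations with index ≥ 1 only add even numbers: parity of the accumulator is preserved
theorem checkStep_tail_parity (n : Nat) : ∀ (xs : List String) (v : Int) (a : Nat),
    1 ≤ a → ((List.range' a n).foldl checkStep (xs, v)).2 % 2 = v % 2 := by
  induction n with
  | zero => intro xs v a _; simp
  | succ m ih =>
    intro xs v a ha
    rw [List.range'_succ, List.foldl_cons]
    rcases xs.eq_nil_or_concat with rfl | ⟨ys, y, rfl⟩
    · simp [checkStep, PySem.List.pop?]
      exact ih [] v (a + 1) (by omega)
    · simp only [List.concat_eq_append]
      have hstep : checkStep (ys ++ [y], v) a = (ys, if y = "1" then v + 2 ^ a else v) := by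
        simp [checkStep, PySem.List.pop?_last]
      rw [hstep]
      by_cases hy : y = "1"
      · simp only [if_pos hy]
        rw [ih ys _ (a + 1) (by omega)]
        have : (2 : Int) ^ a % 2 = 0 := by
          obtain ⟨b, rfl⟩ : ∃ b, a = b + 1 := ⟨a - 1, by omega⟩
          rw [pow_succ]
          omega
        omega
      · simp only [if_neg hy]
        exact ih ys v (a + 1) (by omega)

-- ===== VERDICT (by name: the statement is the Claim_ definition above) =====
theorem check_spec : Claim_equal_check := by
  intro l _
  unfold Spec_check check check_alt
  rcases l.eq_nil_or_concat with rfl | ⟨ys, y, rfl⟩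
  · simp [PySem.Int.mod]
  · simp only [List.concat_eq_append]
    have hlen : (ys ++ [y]).length = ys.length + 1 := by simp
    rw [hlen, List.range_eq_range', List.range'_succ, List.foldl_cons]
    have hpop : PySem.List.pop? (ys ++ [y]) (-1) = some (y, ys) :=
      PySem.List.pop?_last ys y
    simp only [checkStep, hpop, pow_zero, zero_add]
    have htail := checkStep_tail_parity ys.length ys
    rw [PySem.Int.mod_eq_emod_of_pos (by norm_num)]
    by_cases hy : y = "1"
    · simp only [if_pos hy]
      rw [htail 1 1 le_rfl]
      simp [hy]
    · simp only [if_neg hy]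
      rw [htail 0 1 le_rfl]
      simp [hy]
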